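-- pv_equiv track=rewrite | github.com/MarcPartensky/Python-2018 | glou.py | common_sequence
-- ===== SOURCE A (Python) =====
-- def common_sequence(list1,list2):
--     list1.lower()
--     list2.lower()
--     sequences=[]
--     m=min(len(list1),len(list2))
--     for t in range(0,m):
--         for i in range(len(list1)-t):
--             for j in range(len(list2)-t):
--                 if list1[i:i+t+1]==list2[j:j+t+1]:
--                     sequences.append(list1[i:i+t+1])
--     sequences.reverse()
--     return sequences
-- ===== SOURCE B (Python) =====
-- def common_sequence(list1, list2):
--     list1.lower()
--     list2.lower()
--     n1, n2 = len(list1), len(list2)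
--     m = min(n1, n2)
--     # run[(i, j)] = length of the longest common run starting at list1[i] and list2[j]
--     run = {}
--     for i in range(n1 - 1, -1, -1):
--         for j in range(n2 - 1, -1, -1):
--             if list1[i] == list2[j]:
--                 run[(i, j)] = run.get((i + 1, j + 1), 0) + 1
--     out = []
--     for t in range(m - 1, -1, -1):
--         for i in range(n1 - t - 1, -1, -1):
--             for j in range(n2 - t - 1, -1, -1):
--                 if run.get((i, j), 0) > t:
--                     out.append(list1[i:i + t + 1])
--     return out
-- ===== Notes on version B (the rewrite author's own statement) =====
-- stated objective: alternative
-- what changed: Replaces the per-(length,i,j) slice re-comparison (four nested scans) by a suffix-run dynamic-programming table built once, then emits the result directly in descending (length, i, j) order instead of building ascending and reversing; on match-heavy inputs the output size itself dominates, so no overall speedup is claimed.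
import Mathlib
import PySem

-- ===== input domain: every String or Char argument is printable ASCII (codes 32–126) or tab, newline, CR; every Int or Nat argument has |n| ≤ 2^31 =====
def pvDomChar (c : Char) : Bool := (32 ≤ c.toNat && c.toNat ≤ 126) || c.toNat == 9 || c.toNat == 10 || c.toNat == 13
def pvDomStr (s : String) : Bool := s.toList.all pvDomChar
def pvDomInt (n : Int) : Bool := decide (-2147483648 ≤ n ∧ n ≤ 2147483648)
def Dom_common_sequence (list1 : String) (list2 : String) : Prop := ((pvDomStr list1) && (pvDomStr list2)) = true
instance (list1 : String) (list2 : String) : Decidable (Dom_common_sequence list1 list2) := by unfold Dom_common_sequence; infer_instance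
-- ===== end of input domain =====

-- ===== PORT A =====
-- Port of A: triple ascending loop comparing slices of every length, then reverse.
def common_sequence (list1 : String) (list2 : String) : List String :=
  let _ := PySem.Str.lower list1
  let _ := PySem.Str.lower list2
  let sequences : List String := []
  let m : Int := min (PySem.Str.len list1) (PySem.Str.len list2)
  let sequences :=
    (PySem.List.pyRange 0 m 1).foldl (fun acc t =>
      (PySem.List.pyRange 0 (PySem.Str.len list1 - t) 1).foldl (fun acc i =>
        (PySem.List.pyRange 0 (PySem.Str.len list2 - t) 1).foldl (fun acc j =>
          if PySem.Str.slice list1 (some i) (some (i + t + 1)) =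
             PySem.Str.slice list2 (some j) (some (j + t + 1)) then
            acc ++ [PySem.Str.slice list1 (some i) (some (i + t + 1))]
          else acc) acc) acc) sequences
  sequences.reverse

-- ===== PORT B =====
-- Port of B: suffix-run DP table (dict), then descending emission loops (no final reverse).
def common_sequence_alt (list1 : String) (list2 : String) : List String :=
  let _ := PySem.Str.lower list1
  let _ := PySem.Str.lower list2
  let n1 : Int := PySem.Str.len list1
  let n2 : Int := PySem.Str.len list2
  let m : Int := min n1 n2
  let run : PySem.Dict (Int × Int) Int :=
    (PySem.List.pyRange (n1 - 1) (-1) (-1)).foldl (fun run i =>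
      (PySem.List.pyRange (n2 - 1) (-1) (-1)).foldl (fun run j =>
        if PySem.Str.pyGet? list1 i = PySem.Str.pyGet? list2 j then
          run.insert (i, j) (run.getD (i + 1, j + 1) 0 + 1)
        else run) run) PySem.Dict.empty
  let out : List String :=
    (PySem.List.pyRange (m - 1) (-1) (-1)).foldl (fun out t =>
      (PySem.List.pyRange (n1 - t - 1) (-1) (-1)).foldl (fun out i =>
        (PySem.List.pyRange (n2 - t - 1) (-1) (-1)).foldl (fun out j =>
          if run.getD (i, j) 0 > t then
            out ++ [PySem.Str.slice list1 (some i) (some (i + t + 1))]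
          else out) out) out) []
  out

-- ===== PRECONDITION & SPEC =====
def Spec_common_sequence (list1 : String) (list2 : String) (out : List String) : Prop := out = common_sequence_alt list1 list2
instance (list1 : String) (list2 : String) (out : List String) : Decidable (Spec_common_sequence list1 list2 out) := by unfold Spec_common_sequence; infer_instance

-- ===== CLAIM (what is proved, stated in full; the proofs are below) =====
def Claim_equal_common_sequence : Prop := ∀ (list1 : String) (list2 : String), Dom_common_sequence list1 list2 → Spec_common_sequence list1 list2 (common_sequence list1 list2)

-- ===== LEMMAS AND PROOFS =====

-- longest common prefix length of two char lists
def pvCpr : List Char → List Char → Nat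
  | x :: xs, y :: ys => if x = y then pvCpr xs ys + 1 else 0
  | _, _ => 0

theorem pvCpr_nil_left (ys : List Char) : pvCpr [] ys = 0 := by cases ys <;> rfl
theorem pvCpr_nil_right (xs : List Char) : pvCpr xs [] = 0 := by cases xs <;> rfl

theorem pvCpr_take_iff : ∀ (k : Nat) (xs ys : List Char), k ≤ xs.length → k ≤ ys.length →
    (xs.take k = ys.take k ↔ k ≤ pvCpr xs ys)
  | 0, xs, ys, _, _ => by simp
  | k + 1, [], ys, hx, _ => by simp at hx
  | k + 1, x :: xs, [], _, hy => by simp at hy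
  | k + 1, x :: xs, y :: ys, hx, hy => by
    simp only [List.take_succ_cons, List.cons.injEq, pvCpr]
    by_cases h : x = y
    · subst h
      rw [if_pos rfl, pvCpr_take_iff k xs ys (by simpa using hx) (by simpa using hy),
        and_iff_right rfl]
      omega
    · simp [h]

-- the value the DP dict should hold at (i, j): common run length of the suffixes, 0 out of range
def pvR (a b : List Char) (i j : Int) : Int :=
  if 0 ≤ i ∧ i < a.length ∧ 0 ≤ j ∧ j < b.length then
    ((pvCpr (a.drop i.toNat) (b.drop j.toNat) : Int)) else 0

theorem pvR_out (a b : List Char) (i j : Int)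
    (h : ¬(0 ≤ i ∧ i < a.length ∧ 0 ≤ j ∧ j < b.length)) : pvR a b i j = 0 := if_neg h

theorem pvR_in (a b : List Char) (i j : Int)
    (h : 0 ≤ i ∧ i < a.length ∧ 0 ≤ j ∧ j < b.length) :
    pvR a b i j = ((pvCpr (a.drop i.toNat) (b.drop j.toNat) : Int)) := if_pos h

theorem pvR_rec (a b : List Char) (i j : Int)
    (h : 0 ≤ i ∧ i < a.length ∧ 0 ≤ j ∧ j < b.length) :
    pvR a b i j = if a[i.toNat]? = b[j.toNat]? then pvR a b (i + 1) (j + 1) + 1 else 0 := by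
  obtain ⟨h1, h2, h3, h4⟩ := h
  have hia : i.toNat < a.length := by omega
  have hjb : j.toNat < b.length := by omega
  rw [pvR_in a b i j ⟨h1, h2, h3, h4⟩, List.drop_eq_getElem_cons hia, List.drop_eq_getElem_cons hjb]
  simp only [pvCpr, List.getElem?_eq_getElem hia, List.getElem?_eq_getElem hjb,
    Option.some.injEq]
  by_cases hc : a[i.toNat] = b[j.toNat]
  · simp only [if_pos hc]
    by_cases hend : i + 1 < a.length ∧ j + 1 < b.length
    · rw [pvR_in a b (i + 1) (j + 1) ⟨by omega, hend.1, by omega, hend.2⟩]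
      have e1 : (i + 1).toNat = i.toNat + 1 := by omega
      have e2 : (j + 1).toNat = j.toNat + 1 := by omega
      rw [e1, e2]; push_cast; ring
    · rw [pvR_out a b (i + 1) (j + 1) (by omega)]
      rcases (by omega : i.toNat + 1 = a.length ∨ j.toNat + 1 = b.length) with he | he
      · rw [List.drop_eq_nil_of_le (le_of_eq he.symm), pvCpr_nil_left]; norm_num
      · rw [List.drop_eq_nil_of_le (le_of_eq he.symm), pvCpr_nil_right]; norm_num
  · simp [hc]

-- countdown loop 'for j in range(n-1, -1, -1)' with an invariant indexed by the next index
theorem pvCountdown {β : Type} (f : β → Int → β) (P : β → Int → Prop) :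
    ∀ (n : Nat) (d : β), P d n → (∀ d j, 0 ≤ j → j < (n : Int) → P d (j + 1) → P (f d j) j) →
    P ((PySem.List.pyRange ((n : Int) - 1) (-1) (-1)).foldl f d) 0
  | 0, d, h, _ => by
    rw [PySem.List.pyRange_neg_one_eq_nil (by norm_num)]; exact h
  | n + 1, d, h, hstep => by
    rw [PySem.List.pyRange_neg_one_cons (by push_cast; omega)]
    have e1 : ((n : Int) + 1 - 1) = (n : Int) := by ring
    push_cast
    rw [e1, List.foldl_cons]
    exact pvCountdown f P n (f d (n : Int))
      (hstep d (n : Int) (by omega) (by push_cast; omega) (by exact_mod_cast h))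
      (fun d' j hj0 hjn hP => hstep d' j hj0 (by push_cast; omega) hP)

-- the DP dict built by B's first (descending) double loop, named for the proofs
def pvRunDict (list1 : String) (list2 : String) : PySem.Dict (Int × Int) Int :=
  (PySem.List.pyRange (PySem.Str.len list1 - 1) (-1) (-1)).foldl (fun run i =>
    (PySem.List.pyRange (PySem.Str.len list2 - 1) (-1) (-1)).foldl (fun run j =>
      if PySem.Str.pyGet? list1 i = PySem.Str.pyGet? list2 j then
        run.insert (i, j) (run.getD (i + 1, j + 1) 0 + 1)
      else run) run) PySem.Dict.empty

theorem pvRunDict_spec (l1 l2 : String) (x y : Int) :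
    (pvRunDict l1 l2).getD (x, y) 0 = pvR l1.toList l2.toList x y := by
  have hlen1 : PySem.Str.len l1 = (l1.toList.length : Int) := by simp
  have hlen2 : PySem.Str.len l2 = (l2.toList.length : Int) := by simp
  set a := l1.toList with ha
  set b := l2.toList with hb
  have key : ∀ x y, ((pvRunDict l1 l2).getD (x, y) 0) =
      if (0 : Int) ≤ x then pvR a b x y else 0 := by
    have main := pvCountdown
      (fun run i =>
        (PySem.List.pyRange (PySem.Str.len l2 - 1) (-1) (-1)).foldl (fun run j =>
          if PySem.Str.pyGet? l1 i = PySem.Str.pyGet? l2 j then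
            run.insert (i, j) (run.getD (i + 1, j + 1) 0 + 1)
          else run) run)
      (fun d i => ∀ x y, d.getD (x, y) 0 = if i ≤ x then pvR a b x y else 0)
      a.length PySem.Dict.empty
      (by
        intro x y
        rw [PySem.Dict.getD_empty]
        split
        · rename_i hx
          by_cases hge : (a.length : Int) ≤ x
          · rw [pvR_out a b x y (by omega)]
          · omega
        · rfl)
      (by
        intro d i hi0 hin hP
        have inner := pvCountdown
          (fun run j =>
            if PySem.Str.pyGet? l1 i = PySem.Str.pyGet? l2 j then
              run.insert (i, j) (run.getD (i + 1, j + 1) 0 + 1)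
            else run)
          (fun d' jj => ∀ x y, d'.getD (x, y) 0 =
            if (i + 1 ≤ x ∨ (x = i ∧ jj ≤ y)) then pvR a b x y else 0)
          b.length d
          (by
            intro x y
            rw [hP x y]
            by_cases hx1 : i + 1 ≤ x
            · rw [if_pos hx1, if_pos (Or.inl hx1)]
            · rw [if_neg hx1]
              by_cases hcase : x = i ∧ (b.length : Int) ≤ y
              · rw [if_pos (Or.inr hcase), pvR_out a b x y (by omega)]
              · rw [if_neg (by tauto)]
          )
          (by
            intro d' j hj0 hjn hQ
            have hcast : PySem.Str.pyGet? l1 i = PySem.Str.pyGet? l2 j ↔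
                a[i.toNat]? = b[j.toNat]? := by
              rw [show PySem.Str.pyGet? l1 i = a[i.toNat]? by
                    simp [← ha, PySem.List.pyGet?_of_nonneg _ hi0],
                  show PySem.Str.pyGet? l2 j = b[j.toNat]? by
                    simp [← hb, PySem.List.pyGet?_of_nonneg _ hj0]]
            by_cases hc : PySem.Str.pyGet? l1 i = PySem.Str.pyGet? l2 j
            · simp only [if_pos hc]
              intro x y
              have hval : d'.getD (i + 1, j + 1) 0 = pvR a b (i + 1) (j + 1) := by
                rw [hQ (i + 1) (j + 1), if_pos (Or.inl le_rfl)]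
              by_cases hxy : (x, y) = ((i : Int), (j : Int))
              · have hx' : x = i := congrArg Prod.fst hxy
                have hy' : y = j := congrArg Prod.snd hxy
                subst hx'; subst hy'
                rw [PySem.Dict.getD_insert_self, hval,
                  if_pos (Or.inr ⟨rfl, le_rfl⟩),
                  pvR_rec a b x y ⟨hi0, by omega, hj0, by omega⟩,
                  if_pos (hcast.mp hc)]
              · rw [PySem.Dict.getD_insert_of_ne _ _ _ hxy, hQ x y]
                have hne : ¬(x = i ∧ y = j) := by
                  intro ⟨h1, h2⟩; exact hxy (by rw [h1, h2])
                by_cases hcond : i + 1 ≤ x ∨ (x = i ∧ j + 1 ≤ y)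
                · rw [if_pos hcond, if_pos (by omega)]
                · rw [if_neg hcond, if_neg (by omega)]
            · simp only [if_neg hc]
              intro x y
              rw [hQ x y]
              have hij : pvR a b i j = 0 := by
                rw [pvR_rec a b i j ⟨hi0, by omega, hj0, by omega⟩,
                  if_neg (fun h => hc (hcast.mpr h))]
              by_cases hcond : i + 1 ≤ x ∨ (x = i ∧ j + 1 ≤ y)
              · rw [if_pos hcond, if_pos (by omega)]
              · rw [if_neg hcond]
                by_cases hcond2 : i + 1 ≤ x ∨ (x = i ∧ j ≤ y)
                · have hx' : x = i := by omega
                  have hy' : y = j := by omega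
                  rw [if_pos hcond2, hx', hy', hij]
                · rw [if_neg hcond2])
        rw [hlen2]
        intro x y
        rw [inner x y]
        by_cases hx : i ≤ x
        · by_cases hxe : x = i
          · by_cases hy : (0 : Int) ≤ y
            · rw [if_pos (Or.inr ⟨hxe, hy⟩), if_pos hx]
            · rw [if_neg (by omega), if_pos hx, pvR_out a b x y (by omega)]
          · rw [if_pos (Or.inl (by omega)), if_pos hx]
        · rw [if_neg (by omega), if_neg hx])
    have hdef : PySem.List.pyRange (PySem.Str.len l1 - 1) (-1) (-1) =
        PySem.List.pyRange ((a.length : Int) - 1) (-1) (-1) := by rw [hlen1]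
    intro x y
    unfold pvRunDict
    rw [hdef]
    exact main x y
  rw [key x y]
  split
  · rfl
  · rename_i hx; rw [pvR_out a b x y (by omega)]

theorem pvA_eq (l1 l2 : String) :
    common_sequence l1 l2 =
    ((PySem.List.pyRange 0 (min (PySem.Str.len l1) (PySem.Str.len l2)) 1).flatMap (fun t =>
      (PySem.List.pyRange 0 (PySem.Str.len l1 - t) 1).flatMap (fun i =>
        ((PySem.List.pyRange 0 (PySem.Str.len l2 - t) 1).filter (fun j =>
          decide (PySem.Str.slice l1 (some i) (some (i + t + 1)) =
                  PySem.Str.slice l2 (some j) (some (j + t + 1))))).map (fun _ =>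
          PySem.Str.slice l1 (some i) (some (i + t + 1)))))).reverse := by
  unfold common_sequence
  simp only [PySem.List.foldl_append_ite, PySem.List.foldl_append_eq_flatMap, List.nil_append]

theorem pvB_eq (l1 l2 : String) :
    common_sequence_alt l1 l2 =
    (PySem.List.pyRange (min (PySem.Str.len l1) (PySem.Str.len l2) - 1) (-1) (-1)).flatMap (fun t =>
      (PySem.List.pyRange (PySem.Str.len l1 - t - 1) (-1) (-1)).flatMap (fun i =>
        ((PySem.List.pyRange (PySem.Str.len l2 - t - 1) (-1) (-1)).filter (fun j =>
          decide ((pvRunDict l1 l2).getD (i, j) 0 > t))).map (fun _ =>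
          PySem.Str.slice l1 (some i) (some (i + t + 1))))) := by
  unfold common_sequence_alt
  simp only [pvRunDict, PySem.List.foldl_append_ite, PySem.List.foldl_append_eq_flatMap,
    List.nil_append]
  rfl

theorem pvPred (l1 l2 : String) (t i j : Int)
    (ht0 : 0 ≤ t)
    (hi0 : 0 ≤ i) (hi : i < PySem.Str.len l1 - t)
    (hj0 : 0 ≤ j) (hj : j < PySem.Str.len l2 - t) :
    (PySem.Str.slice l1 (some i) (some (i + t + 1)) =
      PySem.Str.slice l2 (some j) (some (j + t + 1))) ↔
    ((pvRunDict l1 l2).getD (i, j) 0 > t) := by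
  have hlen1 : PySem.Str.len l1 = (l1.toList.length : Int) := by simp
  have hlen2 : PySem.Str.len l2 = (l2.toList.length : Int) := by simp
  rw [hlen1] at hi
  rw [hlen2] at hj
  rw [pvRunDict_spec, pvR_in _ _ i j ⟨hi0, by omega, hj0, by omega⟩]
  rw [← String.toList_inj]
  simp only [PySem.Str.toList_slice, PySem.Chars.slice_eq_listSlice]
  rw [PySem.List.slice_toNat _ hi0 (by omega), PySem.List.slice_toNat _ hj0 (by omega)]
  have e1 : (i + t + 1).toNat - i.toNat = t.toNat + 1 := by omega
  have e2 : (j + t + 1).toNat - j.toNat = t.toNat + 1 := by omega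
  rw [e1, e2, pvCpr_take_iff (t.toNat + 1) _ _
    (by rw [List.length_drop]; omega) (by rw [List.length_drop]; omega)]
  omega

-- countdown ranges are reversed ascending ranges
theorem pvRange_rev (c : Int) :
    PySem.List.pyRange (c - 1) (-1) (-1) = (PySem.List.pyRange 0 c 1).reverse := by
  rw [PySem.List.pyRange_neg_one_eq_reverse]
  norm_num

-- ===== VERDICT (by name: the statement is the Claim_ definition above) =====
theorem common_sequence_spec : Claim_equal_common_sequence := by
  unfold Claim_equal_common_sequence Spec_common_sequence
  intro l1 l2 _
  rw [pvB_eq, pvA_eq]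
  simp only [pvRange_rev]
  rw [List.reverse_flatMap]
  apply (List.flatMap_congr ?_).symm
  intro t ht
  rw [List.mem_reverse, PySem.List.mem_pyRange_one] at ht
  simp only [Function.comp_apply]
  rw [List.reverse_flatMap]
  apply List.flatMap_congr
  intro i hi
  rw [List.mem_reverse, PySem.List.mem_pyRange_one] at hi
  simp only [Function.comp_apply]
  rw [List.filter_reverse, ← List.map_reverse]
  refine congrArg _ (congrArg List.reverse (List.filter_congr ?_))
  intro j hj
  rw [PySem.List.mem_pyRange_one] at hj
  rw [decide_eq_decide]
  exact (pvPred l1 l2 t i j (by omega) (by omega) (by omega) (by omega) (by omega)).symm
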